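/- GENERATED by mk_final_copies.py from the proof of the farm's unit `start_decoder.C7a` (farm:start_decoder.C7a.1: Lemmas.lean) as the
   re-elaboration sweep compiled it — do not edit. -/
import Asan.CheckWalk
import Vorbis.Spec.Units.start_decoder_C7a

open X86 X86.User Asan Vorbis Vorbis.Spec Vorbis.Spec.StartDecoder

set_option maxRecDepth 4000
set_option maxHeartbeats 1000000

namespace Vorbis.Spec.start_decoder_C7a

/-- **The point right after the return of compute_codewords (0x1146ed, `test eax, eax`; label `cut115`)** — the proposed cut
inside segment C7: the common part `Frame`, `Built` for the memory after the call, eax ∈ {0, 1}, and VAL on success for a sparse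
book. -/
structure C7aAfterCW (u₀ : State) (g : Ghost) (i : Nat) (A2 A3 Ai Aw : Arena) (A : Arena × List Obj) (lengths values : Nat)
    (w : State) : Prop where
  frame : Frame u₀ g Vorbis.L.start_decoder.cut115 A w
  built : Built g i A2 A3 Ai Aw A lengths values w
  result : w.reg .rax = 0 ∨ w.reg .rax = 1
  val : w.reg .rax = 1 → Codebook.sparse w.mem (g.cb w.mem i) = 1 →
    VAL w.mem values (Codebook.sorted_entries w.mem (g.cb w.mem i)).toNat (Codebook.entries w.mem (g.cb w.mem i)).toNat

set_option maxHeartbeats 4000000 in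
/-- **The first half of segment C7, PROVED** (0x1146d2 … 0x1146ed): the check of `c->entries`, the call of compute_codewords with
its precondition from `Built` (`C7.codewordsPre_of_built`), and everything of `AtC7` carried through the push and the callee's
footprint (`C7.built_through`, `C7.frame_through`, `C7.codewords_through`). -/
theorem c7a_first (Lay : Layout) (hLay : Lay.hi = 0x1000000) (μ : Microarch) (hμ : UserX.MicroOK μ) (u₀ : State)
    (hcode : HasCodeNat Lay u₀ Vorbis.L.start_decoder.entry Vorbis.Code.code_start_decoder.nat Vorbis.L.start_decoder.size)
    (h4 : Asan.SmallCheck Lay μ Vorbis.WayInv (Vorbis.CodeOK u₀) [.rax, .rcx, .rdx] 4 Vorbis.L.__asan_load4_noabort.entry)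
    (hcc : ∀ (others : List Obj) (frames : List (Nat × FrameLayout)) (Blk : Block → Prop),
      Calls Lay μ Vorbis.WayInv (Vorbis.conv u₀) Vorbis.L.compute_codewords.entry
        (Vorbis.Spec.compute_codewords.spec others frames Blk))
    (g : Ghost) (i : Nat) (v : State) (hat : AtC7 u₀ g i v) :
    ReachVia Lay μ WayInv v (fun w => ∃ A lengths values A2 A3 Ai Aw, C7aAfterCW u₀ g i A2 A3 Ai Aw A lengths values w) := by
  obtain ⟨A, lengths, values, A2, A3, Ai, Aw, hin⟩ := hat
  obtain ⟨hfr, hb⟩ := hin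
  have he := hfr.entry
  v_entry he
  have w_rip := hfr.rip
  obtain ⟨hRA, hR8⟩ := hfr.r_eq
  have hRAe : g.RA = (g.e.reg .rsp).toNat := rfl
  simp only [steady, depth] at hRA he_room he_stack
  have w_rsp : v.reg .rsp = g.e.reg .rsp - 1480 := by
    rw [hfr.rsp]
    symm
    apply eq_addr
    u_omega
  have hcr := C7.cb_range hb.cur
  obtain ⟨hlen64, hval64, hvalsp⟩ := C7.built_bounds hb
  obtain ⟨cw, hcw⟩ : ∃ cw : Word, cw = addr (g.cb v.mem i) := ⟨_, rfl⟩
  have hcwn : cw.toNat = g.cb v.mem i := by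
    rw [hcw]
    exact toNat_addr _ (by omega)
  have w_r14 : v.reg .r14 = cw := by
    rw [hcw]
    exact hb.cur.r14
  -- the load of `c->entries` (0x1146db), named before the walk
  have hk1 := hb.k1
  have r_ent : v.mem.readLE (cw + 4) 4 = (Codebook.entries v.mem (g.cb v.mem i)).toNat := by
    have e1 : cw + 4 = addr (g.cb v.mem i + 4) := by
      rw [hcw, addr_add_lit]
    rw [e1]
    have := Mem.u32_of_i32_nonneg v.mem (g.cb v.mem i + 4) hk1.ent_nonneg
    exact this
  have hEb : (Codebook.entries v.mem (g.cb v.mem i)).toNat < 16777216 := by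
    have := hk1.ent_lt
    omega
  have w_rbx := hb.rbx
  have w_r12 := hb.r12
  have w_eq : Mem.EqOn Vorbis.L.textLo Vorbis.L.textHi u₀.mem v.mem := hfr.code
  have hdf : v.flags .df = false := (show abiInv _ from hfr.inv).1
  have hmx : v.mxcsr &&& 0x1F80 = 0x1F80 := (show abiInv _ from hfr.inv).2
  have hsse := Vorbis.sseOK_of_abiInv hfr.inv
  have hcc' := hcc A.2 g.frames' (C7.blkT A)
  have c_rsp := w_rsp
  have c_r14 := w_r14
  have c_rbx := w_rbx
  have c_r12 := w_r12
  u_walk hcode [hμ.vendor] until [Vorbis.L.start_decoder.cut115] span [Vorbis.L.textLo, Vorbis.L.textHi] side (v_side)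
  · -- 0x1146d6: the check of `c->entries` (load4 c + 4): inside the codebooks block
    have hun : ShadowUntouched v.mem s_1146d6.mem := by v_untouched
    apply Vorbis.Spec.check_site hfr.shadow hun (C7.cb_site hb.cur 4 4 (by omega) (by omega))
    u_omega
  · v_inv
  · -- the precondition of compute_codewords: `Built` through the push of the return address
    show CodewordsPre A.2 g.frames' (C7.blkT A) s_1146e8
    have hun : ShadowUntouched v.mem s_1146e8.mem := by v_untouched
    have hpush : Mem.SameExcept [⟨g.R - 8, g.R⟩] v.mem s_1146e8.mem := by
      rw [w_mem]
      apply Mem.SameExcept.writeLE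
      · u_omega
      · refine ⟨_, List.mem_cons_self, ?_, ?_⟩
        · show g.R - 8 ≤ _
          u_omega
        · show _ ≤ g.R
          u_omega
    have hgood : ∀ w, w ∈ [(⟨g.R - 8, g.R⟩ : Span)] → C7.GoodWin g Aw A lengths w := by
      intro w hw
      rw [List.mem_singleton.mp hw]
      left
      show g.R - 408 ≤ g.R - 8 ∧ g.R ≤ g.R
      omega
    obtain ⟨hb1, ecb1, esf1⟩ := C7.built_through hb hfr.shadow hfr.offText (by omega)
      (by omega) hpush hun hgood (w_kept .r14 (by decide)) (w_kept .rbx (by decide)) (w_kept .r12 (by decide))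
    apply C7.codewordsPre_of_built hb1
    · refine ⟨?_, hfr.offText⟩
      have e : (s_1146e8.reg .rsp).toNat + 8 = g.R := by
        rw [w_rsp]
        u_omega
      rw [e]
      exact hfr.shadow.untouched hun
    · rw [w_rdi, ecb1]
      exact hcwn
    · rw [w_rsi]
      exact toNat_addr _ hlen64
    · rw [w_rcx]
      exact toNat_addr _ hval64
    · rw [ecb1, esf1.entries, w_rdx]
      have hnn := hk1.ent_nonneg
      have e : argU32 (Word.ofBV (BitVec.ofNat 32 (Codebook.entries v.mem (g.cb v.mem i)).toNat)) =
          (Codebook.entries v.mem (g.cb v.mem i)).toNat := by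
        rw [ofBV_eq_addr _ (by decide), BitVec.toNat_ofNat]
        show (addr _).toNat % 2 ^ 32 = _
        rw [toNat_addr _ (by omega)]
        omega
      rw [e]
      omega
  · -- after compute_codewords (0x1146ed): everything of `AtC7` through the push and the callee's footprint
    have w_eq := Vorbis.conv_code_eqOn w_code
    have w_df := (show X86.User.abiInv _ from w_inv).1
    have w_mx := (show X86.User.abiInv _ from w_inv).2
    have w_sse := Vorbis.sseOK_of_abiInv w_inv
    have hpost : CodewordsPost s_1146e8 s_1146e8r := w_post
    have hpush : Mem.SameExcept [⟨g.R - 8, g.R⟩] v.mem s_1146e8.mem := by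
      rw [w_mem_1146e8]
      apply Mem.SameExcept.writeLE
      · u_omega
      · refine ⟨_, List.mem_cons_self, ?_, ?_⟩
        · show g.R - 8 ≤ _
          u_omega
        · show _ ≤ g.R
          u_omega
    have hun1 : ShadowUntouched v.mem s_1146e8.mem := by
      apply hpush.eqOn
      intro w hw
      rw [List.mem_singleton.mp hw]
      simp only
      omega
    have hgood1 : ∀ w, w ∈ [(⟨g.R - 8, g.R⟩ : Span)] → C7.GoodWin g Aw A lengths w := by
      intro w hw
      rw [List.mem_singleton.mp hw]
      left
      show g.R - 408 ≤ g.R - 8 ∧ g.R ≤ g.R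
      omega
    obtain ⟨hb1, ecb1, esf1⟩ := C7.built_through hb hfr.shadow hfr.offText (by omega)
      (by omega) hpush hun1 hgood1 (w_kept_1146e8 .r14 (by decide)) (w_kept_1146e8 .rbx (by decide))
      (w_kept_1146e8 .r12 (by decide))
    have hrdi1 : (s_1146e8.reg .rdi).toNat = g.cb s_1146e8.mem i := by
      rw [w_rdi_1146e8, ecb1]
      exact hcwn
    have hrcx1 : (s_1146e8.reg .rcx).toNat = values := by
      rw [w_rcx_1146e8]
      exact toNat_addr _ hval64
    have hrsp1 : (s_1146e8.reg .rsp).toNat = g.R - 8 := by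
      rw [w_rsp_1146e8]
      u_omega
    obtain ⟨ws, hs2, hg2⟩ := C7.codewords_through hb1 hrdi1 hrcx1 hrsp1 (by omega) (by omega)
      w_same hpost.untouched
    -- the two steps as one footprint of good windows
    have h12 : Mem.SameExcept (⟨g.R - 8, g.R⟩ :: ws) v.mem s_1146e8r.mem :=
      (C7.sameExcept_weaken hpush (fun w hw => by
        rw [List.mem_singleton.mp hw]
        exact List.mem_cons_self)).trans
        (C7.sameExcept_weaken hs2 (fun w hw => List.mem_cons_of_mem _ hw))
    have hun12 : ShadowUntouched v.mem s_1146e8r.mem := Mem.EqOn.trans hun1 hpost.untouched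
    have hg12 : ∀ w, w ∈ (⟨g.R - 8, g.R⟩ :: ws) → C7.GoodWin g Aw A lengths w := by
      intro w hw
      rcases List.mem_cons.mp hw with rfl | hw'
      · exact hgood1 _ List.mem_cons_self
      · exact hg2 w hw'
    obtain ⟨hb2, ecb2, esf2⟩ := C7.built_through hb hfr.shadow hfr.offText (by omega)
      (by omega) h12 hun12 hg12 (w_kept .r14 (by decide)) (w_kept .rbx (by decide)) (w_kept .r12 (by decide))
    -- the exit at 0x1146ed, right after the return of compute_codewords
    have hrdx1 : argU32 (s_1146e8.reg .rdx) = (Codebook.entries v.mem (g.cb v.mem i)).toNat := by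
      rw [w_rdx_1146e8, ofBV_eq_addr _ (by decide), BitVec.toNat_ofNat]
      show (addr _).toNat % 2 ^ 32 = _
      rw [toNat_addr _ (by omega)]
      omega
    have hrspr : s_1146e8r.reg .rsp = addr g.R := by
      rw [w_rsp]
      apply eq_addr
      u_omega
    have hfr2 : Frame u₀ g Vorbis.L.start_decoder.cut115 A s_1146e8r :=
      C7.frame_through hfr hb.cur.sd.arena hb.cur.hand h12 hun12 hg12 w_rip hrspr w_eq w_inv
    refine ReachVia.done ⟨A, lengths, values, A2, A3, Ai, Aw, hfr2, hb2, hpost.result, ?_⟩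
    intro hr1 hs
    rw [ecb2, esf2.sparse] at hs
    have hne : Codebook.sparse s_1146e8.mem (s_1146e8.reg .rdi).toNat ≠ 0 := by
      rw [hrdi1, ecb1, esf1.sparse]
      omega
    have hv := hpost.values hr1 hne
    rw [hrcx1, hrdi1, ecb1, esf1.sorted_entries, hrdx1] at hv
    rw [ecb2, esf2.sorted_entries, esf2.entries]
    exact hv

set_option maxHeartbeats 4000000 in
/-- **The test of the result, PROVED** (0x1146ed `test eax, eax ; je 0x1149ba`): eax ≠ 0 → the exit `AtC8` (with VAL); eax = 0 →
the entry of the failure piece with everything of `AtC7`. -/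
theorem c7a_test (Lay : Layout) (hLay : Lay.hi = 0x1000000) (μ : Microarch) (hμ : UserX.MicroOK μ) (u₀ : State)
    (hcode : HasCodeNat Lay u₀ Vorbis.L.start_decoder.entry Vorbis.Code.code_start_decoder.nat Vorbis.L.start_decoder.size)
    (g : Ghost) (i : Nat) (A2 A3 Ai Aw : Arena) (A : Arena × List Obj) (lengths values : Nat) (v : State)
    (hat : C7aAfterCW u₀ g i A2 A3 Ai Aw A lengths values v) :
    ReachVia Lay μ WayInv v (fun w => AtC8 u₀ g i w ∨ InC7F u₀ g i A2 A3 Ai Aw A lengths values w) := by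
  obtain ⟨hfr, hb, hres, hval⟩ := hat
  have he := hfr.entry
  v_entry he
  have w_rip := hfr.rip
  obtain ⟨hRA, hR8⟩ := hfr.r_eq
  have hRAe : g.RA = (g.e.reg .rsp).toNat := rfl
  simp only [steady, depth] at hRA he_room he_stack
  have w_rsp : v.reg .rsp = g.e.reg .rsp - 1480 := by
    rw [hfr.rsp]
    symm
    apply eq_addr
    u_omega
  have w_eq : Mem.EqOn Vorbis.L.textLo Vorbis.L.textHi u₀.mem v.mem := hfr.code
  have hdf : v.flags .df = false := (show abiInv _ from hfr.inv).1
  have hmx : v.mxcsr &&& 0x1F80 = 0x1F80 := (show abiInv _ from hfr.inv).2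
  have hsse := Vorbis.sseOK_of_abiInv hfr.inv
  obtain ⟨z, w_rax⟩ : ∃ z, v.reg .rax = z := ⟨_, rfl⟩
  have c_rax := w_rax
  have c_rsp := w_rsp
  u_walk hcode [hμ.vendor] until [Vorbis.L.start_decoder.cut116, Vorbis.L.start_decoder.at_1149ba] span [Vorbis.L.textLo, Vorbis.L.textHi] side (v_side)
  · -- eax = 0: the entry of the failure piece, 0x1149ba
    have hs0 : Mem.SameExcept [] v.mem s_1146ef.mem := by
      rw [w_mem]
      exact Mem.SameExcept.refl _ _
    have hsh0 : Mem.EqOn 0xC00000 0xE00000 v.mem s_1146ef.mem := by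
      rw [w_mem]
      exact Mem.EqOn.refl _ _ _
    have hg0 : ∀ w, w ∈ ([] : List Span) → C7.GoodWin g Aw A lengths w := fun w hw => absurd hw List.not_mem_nil
    obtain ⟨hb', _, _⟩ := C7.built_through hb hfr.shadow hfr.offText (by omega) (by omega) hs0 hsh0 hg0
      (w_kept .r14 (by decide)) (w_kept .rbx (by decide)) (w_kept .r12 (by decide))
    have hrsp' : s_1146ef.reg .rsp = addr g.R := by
      rw [w_kept .rsp (by decide)]
      exact hfr.rsp
    have hinv' : abiInv s_1146ef := by v_inv
    have hfr' : Frame u₀ g Vorbis.L.start_decoder.at_1149ba A s_1146ef :=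
      C7.frame_through hfr hb.cur.sd.arena hb.cur.hand hs0 hsh0 hg0 w_rip hrsp' w_eq hinv'
    refine ReachVia.done (Or.inr ⟨hfr', hb', ?_⟩)
    rw [w_kept .rax (by decide), c_rax]
    exact hbr_1146ef
  · -- eax ≠ 0: the exit `AtC8` (0x1146f5)
    have hs0 : Mem.SameExcept [] v.mem s_1146ef.mem := by
      rw [w_mem]
      exact Mem.SameExcept.refl _ _
    have hsh0 : Mem.EqOn 0xC00000 0xE00000 v.mem s_1146ef.mem := by
      rw [w_mem]
      exact Mem.EqOn.refl _ _ _
    have hg0 : ∀ w, w ∈ ([] : List Span) → C7.GoodWin g Aw A lengths w := fun w hw => absurd hw List.not_mem_nil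
    obtain ⟨hb', _, _⟩ := C7.built_through hb hfr.shadow hfr.offText (by omega) (by omega) hs0 hsh0 hg0
      (w_kept .r14 (by decide)) (w_kept .rbx (by decide)) (w_kept .r12 (by decide))
    have hrsp' : s_1146ef.reg .rsp = addr g.R := by
      rw [w_kept .rsp (by decide)]
      exact hfr.rsp
    have hinv' : abiInv s_1146ef := by v_inv
    have hfr' : Frame u₀ g pc_C8 A s_1146ef :=
      C7.frame_through hfr hb.cur.sd.arena hb.cur.hand hs0 hsh0 hg0 w_rip hrsp' w_eq hinv'
    refine ReachVia.done (Or.inl ⟨A, lengths, values, A2, A3, Ai, Aw, hfr', hb', ?_⟩)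
    rw [w_mem]
    apply hval
    rw [c_rax]
    rcases hres with h0 | h1
    · exfalso
      rw [c_rax] at h0
      rw [h0] at hbr_1146ef
      exact hbr_1146ef (by decide)
    · rw [c_rax] at h1
      exact h1

end Vorbis.Spec.start_decoder_C7a
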